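-- pv_equiv track=rewrite | github.com/Saaatsuki/Python-Practice-Problem | Chulmun/복습/24_06/240624/14-2.py | getSplit
-- ===== SOURCE A (Python) =====
-- def getSplit(argTxt,argSplit):
--     word_li = []
--     word = ""
--
--     for char in argTxt:
--         if char != argSplit:
--             word += char
--         else:
--             if word:
--                 word_li.append(word)
--                 word = ""
--     if word:
--         word_li.append(word)
--     return word_li
-- ===== SOURCE B (Python) =====
-- def getSplit(argTxt, argSplit):
--     out = []
--     i, n = 0, len(argTxt)
--     while i < n:
--         if argTxt[i] == argSplit:
--             i += 1
--         else:
--             j = i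
--             while j < n and argTxt[j] != argSplit:
--                 j += 1
--             out.append(argTxt[i:j])
--             i = j
--     return out
-- ===== Notes on version B (the rewrite author's own statement) =====
-- stated objective: alternative
-- what changed: Replaces A's char-by-char accumulator (word += char) with an index-based scan that finds each maximal delimiter-free run and appends it as a single slice, so no intermediate word string is ever rebuilt.
import Mathlib
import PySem

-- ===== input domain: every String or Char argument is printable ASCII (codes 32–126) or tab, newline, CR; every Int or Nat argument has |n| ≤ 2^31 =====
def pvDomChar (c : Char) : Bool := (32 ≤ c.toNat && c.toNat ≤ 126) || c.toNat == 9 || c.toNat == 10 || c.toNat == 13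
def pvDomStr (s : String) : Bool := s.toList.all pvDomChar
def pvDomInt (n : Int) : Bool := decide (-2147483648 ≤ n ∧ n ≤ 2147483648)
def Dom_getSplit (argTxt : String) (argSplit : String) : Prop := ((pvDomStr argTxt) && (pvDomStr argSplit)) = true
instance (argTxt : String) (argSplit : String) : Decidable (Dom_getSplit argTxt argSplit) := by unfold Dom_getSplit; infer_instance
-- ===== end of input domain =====

-- B replaces A's char-by-char word accumulator with a scan over maximal delimiter-free runs (alternative decomposition).


-- ===== PORT A =====
-- word is kept as a List Char (word += char ↦ word ++ [c]); 'char != argSplit' is 'String.ofList [c] ≠ argSplit'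
def getSplit (argTxt : String) (argSplit : String) : List String :=
  let st := argTxt.toList.foldl
    (fun (st : List String × List Char) c =>
      if String.ofList [c] ≠ argSplit then (st.1, st.2 ++ [c])
      else if st.2 ≠ [] then (st.1 ++ [String.ofList st.2], ([] : List Char)) else st)
    (([] : List String), ([] : List Char))
  if st.2 ≠ [] then st.1 ++ [String.ofList st.2] else st.1

-- ===== PORT B =====
-- the outer while loop: skip a delimiter char, otherwise the inner while finds the end of the
-- maximal delimiter-free run (takeWhile) and the loop resumes after it (dropWhile)
def getSplitRuns (d : String) : List Char → List String
  | [] => []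
  | c :: rest =>
    if String.ofList [c] = d then getSplitRuns d rest
    else String.ofList (c :: rest.takeWhile (fun x => String.ofList [x] != d)) ::
         getSplitRuns d (rest.dropWhile (fun x => String.ofList [x] != d))
termination_by l => l.length
decreasing_by
  · simp
  · simpa using Nat.lt_succ_of_le (List.length_dropWhile_le _ _)

def getSplit_alt (argTxt : String) (argSplit : String) : List String :=
  getSplitRuns argSplit argTxt.toList

-- ===== PRECONDITION & SPEC =====
def Spec_getSplit (argTxt : String) (argSplit : String) (out : List String) : Prop := out = getSplit_alt argTxt argSplit
instance (argTxt : String) (argSplit : String) (out : List String) : Decidable (Spec_getSplit argTxt argSplit out) := by unfold Spec_getSplit; infer_instance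

-- ===== CLAIM (what is proved, stated in full; the proofs are below) =====
def Claim_equal_getSplit : Prop := ∀ (argTxt : String) (argSplit : String), Dom_getSplit argTxt argSplit → Spec_getSplit argTxt argSplit (getSplit argTxt argSplit)

-- ===== LEMMAS AND PROOFS =====

-- A's loop, rephrased as a recursion carrying only the pending word
def gAux (d : String) : List Char → List Char → List String
  | word, [] => if word = [] then [] else [String.ofList word]
  | word, c :: rest =>
    if String.ofList [c] ≠ d then gAux d (word ++ [c]) rest
    else if word = [] then gAux d [] rest else String.ofList word :: gAux d [] rest

lemma foldA_eq_gAux (d : String) (l : List Char) :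
    ∀ (acc : List String) (word : List Char),
      (let st := l.foldl
        (fun (st : List String × List Char) c =>
          if String.ofList [c] ≠ d then (st.1, st.2 ++ [c])
          else if st.2 ≠ [] then (st.1 ++ [String.ofList st.2], ([] : List Char)) else st)
        (acc, word)
       if st.2 ≠ [] then st.1 ++ [String.ofList st.2] else st.1) = acc ++ gAux d word l := by
  induction l with
  | nil =>
    intro acc word
    simp only [List.foldl_nil, gAux]
    by_cases h : word = [] <;> simp [h]
  | cons c rest ih =>
    intro acc word
    rw [List.foldl_cons]
    by_cases h : String.ofList [c] = d
    · by_cases hw : word = []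
      · rw [show (if String.ofList [c] ≠ d then ((acc, word).1, (acc, word).2 ++ [c])
            else if (acc, word).2 ≠ [] then ((acc, word).1 ++ [String.ofList (acc, word).2], ([] : List Char))
            else (acc, word)) = (acc, word) from by simp [h, hw]]
        rw [ih]
        simp [gAux, h, hw]
      · rw [show (if String.ofList [c] ≠ d then ((acc, word).1, (acc, word).2 ++ [c])
            else if (acc, word).2 ≠ [] then ((acc, word).1 ++ [String.ofList (acc, word).2], ([] : List Char))
            else (acc, word)) = (acc ++ [String.ofList word], ([] : List Char)) from by simp [h, hw]]
        rw [ih]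
        simp [gAux, h, hw]
    · rw [show (if String.ofList [c] ≠ d then ((acc, word).1, (acc, word).2 ++ [c])
          else if (acc, word).2 ≠ [] then ((acc, word).1 ++ [String.ofList (acc, word).2], ([] : List Char))
          else (acc, word)) = (acc, word ++ [c]) from by simp [h]]
      rw [ih]
      simp [gAux, h]

lemma gAux_eq_runs (d : String) : ∀ (n : Nat) (l : List Char), l.length ≤ n →
    gAux d [] l = getSplitRuns d l ∧
    (∀ word, word ≠ [] →
      gAux d word l =
        String.ofList (word ++ l.takeWhile (fun x => String.ofList [x] != d)) ::
        getSplitRuns d (l.dropWhile (fun x => String.ofList [x] != d))) := by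
  intro n
  induction n with
  | zero =>
    intro l hl
    have : l = [] := List.eq_nil_of_length_eq_zero (Nat.le_zero.mp hl)
    subst this
    constructor
    · simp [gAux, getSplitRuns]
    · intro word hw; simp [gAux, hw, getSplitRuns]
  | succ n ih =>
    intro l hl
    cases l with
    | nil =>
      constructor
      · simp [gAux, getSplitRuns]
      · intro word hw; simp [gAux, hw, getSplitRuns]
    | cons c rest =>
      have hrest : rest.length ≤ n := by simpa using Nat.lt_succ_iff.mp (Nat.lt_of_lt_of_le (by simp) hl)
      have hdrop : (rest.dropWhile (fun x => String.ofList [x] != d)).length ≤ n :=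
        le_trans (List.length_dropWhile_le _ _) hrest
      constructor
      · by_cases h : String.ofList [c] = d
        · simp only [gAux, getSplitRuns, h]
          simp [(ih rest hrest).1]
        · rw [show gAux d [] (c :: rest) = gAux d [c] rest from by
                rw [gAux]; rw [if_pos h]; rfl]
          rw [(ih rest hrest).2 [c] (by simp)]
          rw [show getSplitRuns d (c :: rest)
              = String.ofList (c :: rest.takeWhile (fun x => String.ofList [x] != d)) ::
                getSplitRuns d (rest.dropWhile (fun x => String.ofList [x] != d)) from by
                rw [getSplitRuns]; rw [if_neg h]]
          rfl
      · intro word hw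
        by_cases h : String.ofList [c] = d
        · simp only [gAux, h]
          rw [if_neg (not_not_intro rfl), if_neg hw]
          rw [List.takeWhile_cons_of_neg (by simp [h]), List.dropWhile_cons_of_neg (by simp [h])]
          simp only [List.append_nil, getSplitRuns, if_pos h]
          simp [(ih rest hrest).1]

        · simp only [gAux]
          rw [if_pos h]
          rw [(ih rest hrest).2 (word ++ [c]) (by simp)]
          rw [List.takeWhile_cons_of_pos (by simp [h]), List.dropWhile_cons_of_pos (by simp [h])]
          simp

-- ===== VERDICT (by name: the statement is the Claim_ definition above) =====
theorem getSplit_spec : Claim_equal_getSplit := by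
  intro argTxt argSplit _
  unfold Spec_getSplit getSplit getSplit_alt
  rw [foldA_eq_gAux argSplit argTxt.toList [] []]
  rw [(gAux_eq_runs argSplit argTxt.toList.length argTxt.toList (le_refl _)).1]
  simp
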